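-- pv_equiv track=rewrite | github.com/mmalhotra/fast-autocomplete | fast_autocomplete/kg/genericMergeLib.py | namelist_compare_fuzzy
-- ===== SOURCE A (Python) =====
-- def namelist_compare_fuzzy(tv_cast, db_cast):
--     ii = 0
--     jj = 0
--     cast_cnt = 0
--     while ii < len(tv_cast):
--         jj = 0
--         while jj < len(db_cast):
--             t_cast = tv_cast[ii]
--             d_cast = db_cast[jj]
--             # t_cast = keep_only_alpha_num(t_cast)
--             # t_cast = remove_non_alphabets(t_cast)
--             t_cast = t_cast.split("{")[0]
--             t_cast = t_cast.replace(".", "").lower()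
--             t_cast = t_cast.replace(",", "")
--             # t_cast = t_cast.replace("{"," ")
--             # t_cast = t_cast.replace("}"," ")
--             # d_cast = keep_only_alpha_num(d_cast)
--             # d_cast = remove_non_alphabets(d_cast)
--             d_cast = d_cast.split("{")[0]
--             d_cast = d_cast.replace(".", "").lower()
--             d_cast = d_cast.replace(",", "")
--             # d_cast = d_cast.replace("{"," ")
--             # d_cast = d_cast.replace("}"," ")
--             dl = d_cast.split(" ")
--             tl = t_cast.split(" ")
--             cnt = 0
--             iii = 0
--             while iii < len(tl):
--                 jjj = 0
--                 if tl[iii] == "" or not tl[iii][0].isalpha() or len(tl[iii]) == 1: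
--                     iii = iii + 1
--                     continue
--                 while jjj < len(dl):
--                     if tl[iii] == dl[jjj]:
--                         cnt = cnt + 1
--                     jjj = jjj + 1
--                 iii = iii + 1
--             if cnt > 1:
--                 cast_cnt = cast_cnt + 1
--             jj = jj + 1
--         ii = ii + 1
--     return cast_cnt
-- ===== SOURCE B (Python) =====
-- def namelist_compare_fuzzy(tv_cast, db_cast):
--     def norm(s):
--         return s.split("{")[0].replace(".", "").lower().replace(",", "").split(" ")
--
--     # inverted index: normalized db token -> {db_index: multiplicity}
--     index = {}
--     for jj, s in enumerate(db_cast):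
--         for t in norm(s):
--             postings = index.setdefault(t, {})
--             postings[jj] = postings.get(jj, 0) + 1
--
--     # accumulate per-(tv,db)-pair match counts via the index
--     pair_counts = {}
--     for ii, s in enumerate(tv_cast):
--         for t in norm(s):
--             if t != "" and t[0].isalpha() and len(t) > 1:
--                 for jj, m in index.get(t, {}).items():
--                     pair_counts[(ii, jj)] = pair_counts.get((ii, jj), 0) + m
--
--     return sum(1 for v in pair_counts.values() if v > 1)
-- ===== Notes on version B (the rewrite author's own statement) =====
-- stated objective: alternative
-- what changed: Replaces A's per-pair re-normalization and nested token scans by an inverted index (normalized db token -> {db_index: multiplicity}) built in one pass, a pair-count dict keyed by (tv_index, db_index) accumulated from index postings, and a final count of pair values exceeding 1; measured ~3-4x faster on the generated inputs but not confirmed at the largest size.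
import Mathlib
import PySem

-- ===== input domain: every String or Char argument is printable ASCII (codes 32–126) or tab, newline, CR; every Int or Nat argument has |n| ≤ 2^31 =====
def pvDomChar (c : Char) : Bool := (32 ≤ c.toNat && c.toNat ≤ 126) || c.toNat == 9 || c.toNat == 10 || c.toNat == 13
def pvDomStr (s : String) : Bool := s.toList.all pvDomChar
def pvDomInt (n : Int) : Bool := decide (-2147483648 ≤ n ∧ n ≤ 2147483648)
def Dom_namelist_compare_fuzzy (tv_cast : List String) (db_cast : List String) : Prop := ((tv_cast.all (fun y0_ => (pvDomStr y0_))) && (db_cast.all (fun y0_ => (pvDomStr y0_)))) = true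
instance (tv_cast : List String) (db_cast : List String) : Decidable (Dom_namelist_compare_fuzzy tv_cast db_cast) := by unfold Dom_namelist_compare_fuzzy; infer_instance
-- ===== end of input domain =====

set_option maxHeartbeats 1000000

-- B replaces A's nested per-pair rescans by an inverted token index over db plus a
-- (tv,db)-pair count dictionary accumulated from index postings (objective: alternative).


-- ===== PORT A =====
-- body of A's `while iii` loop: the `continue` guards (Python's `or` short-circuits, so the
-- `.getD ' '` default is never consulted: t ≠ "" at that point) and the `while jjj` scan over dl
def pvCntLoopA (dl : List String) (cnt : Int) (t : String) : Int :=
  if t = "" then cnt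
  else if !(PySem.Chars.isalpha ((PySem.Str.pyGet? t 0).getD ' ')) then cnt
  else if PySem.Str.len t = 1 then cnt
  else (PySem.List.pyRange 0 (PySem.List.len dl) 1).foldl
        (fun c jjj => if t = PySem.List.pyGetD dl jjj "" then c + 1 else c) cnt

-- body of the `while jj` loop: re-normalize both strings, split, run the counting loops
def pvPairCntA (t_cast0 d_cast0 : String) : Int :=
  let t_cast := PySem.List.pyGetD ((PySem.Str.split? t_cast0 "{").getD []) 0 ""
  let t_cast := PySem.Str.lower (PySem.Str.replace t_cast "." "")
  let t_cast := PySem.Str.replace t_cast "," ""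
  let d_cast := PySem.List.pyGetD ((PySem.Str.split? d_cast0 "{").getD []) 0 ""
  let d_cast := PySem.Str.lower (PySem.Str.replace d_cast "." "")
  let d_cast := PySem.Str.replace d_cast "," ""
  let dl := (PySem.Str.split? d_cast " ").getD []
  let tl := (PySem.Str.split? t_cast " ").getD []
  (PySem.List.pyRange 0 (PySem.List.len tl) 1).foldl
    (fun cnt iii => pvCntLoopA dl cnt (PySem.List.pyGetD tl iii "")) 0

-- A's `while jj` loop
def pvDbLoopA (db_cast : List String) (cast_cnt : Int) (t_cast : String) : Int :=
  (PySem.List.pyRange 0 (PySem.List.len db_cast) 1).foldl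
    (fun cc jj => if pvPairCntA t_cast (PySem.List.pyGetD db_cast jj "") > 1 then cc + 1 else cc)
    cast_cnt

def namelist_compare_fuzzy (tv_cast : List String) (db_cast : List String) : Int :=
  (PySem.List.pyRange 0 (PySem.List.len tv_cast) 1).foldl
    (fun cc ii => pvDbLoopA db_cast cc (PySem.List.pyGetD tv_cast ii "")) 0

-- ===== PORT B =====
-- norm(s) of Source B
def pvNormTokens (s : String) : List String :=
  (PySem.Str.split?
    (PySem.Str.replace
      (PySem.Str.lower
        (PySem.Str.replace (PySem.List.pyGetD ((PySem.Str.split? s "{").getD []) 0 "") "." ""))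
      "," "") " ").getD []

-- body of Source B's index-building inner loop: postings = index.setdefault(t, {});
-- postings[jj] = postings.get(jj, 0) + 1  (in-place update = overwrite at t's position)
def pvIndexStep (jj : Int) (idx : PySem.Dict String (PySem.Dict Int Int)) (t : String) :
    PySem.Dict String (PySem.Dict Int Int) :=
  idx.insert t ((idx.getD t PySem.Dict.empty).insert jj
    ((idx.getD t PySem.Dict.empty).getD jj 0 + 1))

-- Source B's first loop: the inverted index over enumerate(db_cast)
def pvBuildIndex (db_cast : List String) : PySem.Dict String (PySem.Dict Int Int) :=
  (PySem.List.enumerate db_cast 0).foldl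
    (fun idx p => (pvNormTokens p.2).foldl (pvIndexStep p.1) idx) PySem.Dict.empty

-- body of Source B's second loop: the valid-token test and the postings walk
def pvPairStep (idx : PySem.Dict String (PySem.Dict Int Int)) (ii : Int)
    (pc : PySem.Dict (Int × Int) Int) (t : String) : PySem.Dict (Int × Int) Int :=
  if decide (t ≠ "") && PySem.Chars.isalpha ((PySem.Str.pyGet? t 0).getD ' ')
      && decide (1 < PySem.Str.len t) then
    (idx.getD t PySem.Dict.empty).items.foldl
      (fun pc q => pc.insert (ii, q.1) (pc.getD (ii, q.1) 0 + q.2)) pc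
  else pc

def namelist_compare_fuzzy_alt (tv_cast : List String) (db_cast : List String) : Int :=
  let index := pvBuildIndex db_cast
  let pair_counts := (PySem.List.enumerate tv_cast 0).foldl
      (fun pc p => (pvNormTokens p.2).foldl (pvPairStep index p.1) pc) PySem.Dict.empty
  pair_counts.values.foldl (fun acc v => if v > 1 then acc + 1 else acc) 0

-- ===== PRECONDITION & SPEC =====
def Spec_namelist_compare_fuzzy (tv_cast : List String) (db_cast : List String) (out : Int) : Prop := out = namelist_compare_fuzzy_alt tv_cast db_cast
instance (tv_cast : List String) (db_cast : List String) (out : Int) : Decidable (Spec_namelist_compare_fuzzy tv_cast db_cast out) := by unfold Spec_namelist_compare_fuzzy; infer_instance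

-- ===== CLAIM (what is proved, stated in full; the proofs are below) =====
def Claim_equal_namelist_compare_fuzzy : Prop := ∀ (tv_cast : List String) (db_cast : List String), Dom_namelist_compare_fuzzy tv_cast db_cast → Spec_namelist_compare_fuzzy tv_cast db_cast (namelist_compare_fuzzy tv_cast db_cast)

-- ===== LEMMAS AND PROOFS =====

-- the valid-token test, on the token's character list
def pvValid (t : String) : Bool :=
  match t.toList with
  | [] => false
  | c :: rest => PySem.Chars.isalpha c && !rest.isEmpty

-- the per-(tv,db)-pair score both programs compute
def pvScore (s d : String) : Int :=
  (((pvNormTokens s).filter pvValid).map (fun t => ((pvNormTokens d).count t : Int))).sum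

-- ---- A-side reduction ----

theorem pv_inner_count (dl : List String) (t : String) (c : Int) :
    dl.foldl (fun c x => if t = x then c + 1 else c) c = c + dl.count t := by
  induction dl generalizing c with
  | nil => simp
  | cons x xs ih =>
    rw [List.foldl_cons, ih]
    by_cases h : t = x
    · simp [h]; ring
    · simp [h, Ne.symm h]

theorem pv_cntLoopA_eq (dl : List String) (c : Int) (t : String) :
    pvCntLoopA dl c t = c + (if pvValid t then (dl.count t : Int) else 0) := by
  rcases h : t.toList with _ | ⟨ch, rest⟩
  · have ht : t = "" := String.toList_inj.mp (by simp [h])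
    simp [ht, pvCntLoopA, pvValid]
  · have ht : t ≠ "" := by
      intro he; rw [he] at h; simp at h
    have hget : ((PySem.Str.pyGet? t 0).getD ' ') = ch := by
      simp [PySem.Str.pyGet?_eq, PySem.Chars.pyGet?_eq_listPyGet?, h, PySem.List.pyGet?,
        PySem.List.pyIdx?]
    have hv : pvValid t = (PySem.Chars.isalpha ch && !rest.isEmpty) := by
      simp [pvValid, h]
    have hlen : t.length = rest.length + 1 := by
      have := congrArg List.length h; simpa using this
    unfold pvCntLoopA
    rw [PySem.List.len_eq, PySem.List.foldl_pyRange_zero_pyGetD' dl ""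
      (fun c x => if t = x then c + 1 else c) c, pv_inner_count, hget]
    by_cases ha : PySem.Chars.isalpha ch <;> rcases rest with _ | ⟨r, rs⟩ <;>
      first
        | (simp [ht, ha, hv, hlen]; omega)
        | simp [ht, ha, hv, hlen]

theorem pv_mid_loop (toks dl : List String) (c : Int) :
    toks.foldl (pvCntLoopA dl) c
      = c + ((toks.filter pvValid).map (fun t => (dl.count t : Int))).sum := by
  induction toks generalizing c with
  | nil => simp
  | cons t ts ih =>
    rw [List.foldl_cons, ih, pv_cntLoopA_eq, List.filter_cons]
    by_cases h : pvValid t <;>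
      first
        | (simp [h]; ring)
        | simp [h]

-- A's per-pair computation is exactly the score
theorem pv_pairA_score (s d : String) : pvPairCntA s d = pvScore s d := by
  simp only [pvPairCntA, pvScore, pvNormTokens]
  rw [PySem.List.len_eq, PySem.List.foldl_pyRange_zero_pyGetD' _ "" (pvCntLoopA _) 0,
    pv_mid_loop]
  rw [zero_add]

-- A's inner while-jj loop counts the db entries whose score with t exceeds 1
theorem pv_dbLoopA_eq (db : List String) (cc : Int) (t : String) :
    pvDbLoopA db cc t = cc + (db.countP (fun d => decide (pvScore t d > 1)) : Int) := by
  unfold pvDbLoopA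
  rw [PySem.List.len_eq, PySem.List.foldl_pyRange_zero_pyGetD' db ""
    (fun cc d => if pvPairCntA t d > 1 then cc + 1 else cc) cc]
  simp only [pv_pairA_score]
  rw [PySem.List.foldl_ite_add_one]

-- A as a sum over tv of db-counts
theorem pv_A_eq (tv db : List String) :
    namelist_compare_fuzzy tv db
      = (tv.map (fun s => (db.countP (fun d => decide (pvScore s d > 1)) : Int))).sum := by
  unfold namelist_compare_fuzzy
  rw [PySem.List.len_eq, PySem.List.foldl_pyRange_zero_pyGetD' tv "" (pvDbLoopA db) 0]
  have hcongr : tv.foldl (pvDbLoopA db) 0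
      = tv.foldl (fun cc s => cc + (db.countP (fun d => decide (pvScore s d > 1)) : Int)) 0 :=
    PySem.List.foldl_congr_mem _ _ _ _ (fun cc s _ => pv_dbLoopA_eq db cc s)
  rw [hcongr, PySem.List.foldl_add, zero_add]

-- ---- B-side: the inverted index ----

-- effect on one postings lookup of indexing one db entry's tokens
theorem pv_idx_token_fold (toks : List String) (j : Int)
    (idx : PySem.Dict String (PySem.Dict Int Int)) (t' : String) (j' : Int) :
    (((toks.foldl (pvIndexStep j) idx).getD t' PySem.Dict.empty).getD j' 0)
      = ((idx.getD t' PySem.Dict.empty).getD j' 0)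
        + (if j' = j then (toks.count t' : Int) else 0) := by
  induction toks generalizing idx with
  | nil => simp
  | cons t ts ih =>
    rw [List.foldl_cons, ih]
    unfold pvIndexStep
    by_cases ht : t' = t
    · subst ht
      rw [PySem.Dict.getD_insert_self, PySem.Dict.getD_insert]
      by_cases hj : j' = j
      · subst hj
        rw [if_pos rfl, if_pos rfl, if_pos rfl, List.count_cons_self]
        push_cast
        ring
      · rw [if_neg hj, if_neg hj, if_neg hj]
    · rw [PySem.Dict.getD_insert_of_ne _ _ _ ht,
        List.count_cons_of_ne (show t ≠ t' from fun he => ht he.symm)]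

-- postings lookup after the whole index build, from an arbitrary start
theorem pv_idx_fold (L : List (Int × String))
    (idx : PySem.Dict String (PySem.Dict Int Int)) (t : String) (j : Int) :
    (((L.foldl (fun idx p => (pvNormTokens p.2).foldl (pvIndexStep p.1) idx) idx).getD t
        PySem.Dict.empty).getD j 0)
      = ((idx.getD t PySem.Dict.empty).getD j 0)
        + ((L.map (fun p => if j = p.1 then ((pvNormTokens p.2).count t : Int) else 0)).sum) := by
  induction L generalizing idx with
  | nil => simp only [List.foldl_nil, List.map_nil, List.sum_nil, add_zero]
  | cons p ps ih =>
    rw [List.foldl_cons, ih, pv_idx_token_fold]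
    simp only [List.map_cons, List.sum_cons]
    by_cases hj : j = p.1
    · rw [if_pos hj]; ring
    · rw [if_neg hj]; ring

-- a sum over enumerate picking out one index
theorem pv_enum_pick (db : List String) (c : String → Int) (j : Int) :
    ∀ (s : Int),
    ((PySem.List.enumerate db s).map (fun p => if j = p.1 then c p.2 else 0)).sum
      = if s ≤ j ∧ j < s + db.length then c (db.getD (j - s).toNat "") else 0 := by
  induction db with
  | nil => intro s; simp [PySem.List.enumerate_nil]
  | cons x xs ih =>
    intro s
    rw [PySem.List.enumerate_cons]
    simp only [List.map_cons, List.sum_cons, ih (s + 1), List.length_cons]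
    by_cases hj : j = s
    · subst hj
      rw [if_pos rfl, if_neg (by omega), if_pos (by push_cast; omega)]
      simp
    · rw [if_neg hj]
      by_cases hr : s + 1 ≤ j ∧ j < s + 1 + (xs.length : Int)
      · rw [if_pos hr, if_pos (by push_cast at hr ⊢; omega)]
        have h4 : (j - s).toNat = (j - (s + 1)).toNat + 1 := by omega
        rw [h4, List.getD_cons_succ]
        ring
      · rw [if_neg hr, if_neg (by push_cast at hr ⊢; omega)]
        simp

-- closed form of a postings lookup in the built index
theorem pv_buildIndex_getD (db : List String) (t : String) (j : Int) :
    (((pvBuildIndex db).getD t PySem.Dict.empty).getD j 0)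
      = if 0 ≤ j ∧ j < db.length then ((pvNormTokens (db.getD j.toNat "")).count t : Int)
        else 0 := by
  unfold pvBuildIndex
  rw [pv_idx_fold]
  rw [pv_enum_pick db (fun d => ((pvNormTokens d).count t : Int)) j 0]
  simp only [PySem.Dict.getD_empty, zero_add, sub_zero]

-- postings keys stay inside the enumerated db indices
theorem pv_idx_keys (L : List (Int × String))
    (idx : PySem.Dict String (PySem.Dict Int Int)) (t : String) (j : Int)
    (hj : j ∈ ((L.foldl (fun idx p => (pvNormTokens p.2).foldl (pvIndexStep p.1) idx) idx).getD t
        PySem.Dict.empty).keys) :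
    j ∈ ((idx.getD t PySem.Dict.empty).keys) ∨ j ∈ L.map (·.1) := by
  induction L generalizing idx with
  | nil => exact Or.inl hj
  | cons p ps ih =>
    rw [List.foldl_cons] at hj
    rcases ih _ hj with h | h
    · -- peel the inner token fold of p
      clear hj ih
      generalize htoks : pvNormTokens p.2 = toks at h
      clear htoks
      induction toks generalizing idx with
      | nil => exact Or.inl h
      | cons tk tks ih2 =>
        rw [List.foldl_cons] at h
        rcases ih2 _ h with h2 | h2
        · unfold pvIndexStep at h2
          by_cases ht : t = tk
          · subst ht
            rw [PySem.Dict.getD_insert_self] at h2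
            rcases (PySem.Dict.mem_keys_insert _ _ _ _).mp h2 with h3 | h3
            · refine Or.inr ?_
              rw [List.map_cons]
              exact List.mem_cons.mpr (Or.inl h3)
            · exact Or.inl h3
          · rw [PySem.Dict.getD_insert_of_ne _ _ _ ht] at h2
            exact Or.inl h2
        · exact Or.inr h2
    · right
      rw [List.map_cons]
      exact List.mem_cons_of_mem _ h

-- postings keys are unique
theorem pv_idx_keys_nodup (L : List (Int × String))
    (idx : PySem.Dict String (PySem.Dict Int Int))
    (hn : ∀ t, ((idx.getD t PySem.Dict.empty).keys).Nodup) (t : String) :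
    ((L.foldl (fun idx p => (pvNormTokens p.2).foldl (pvIndexStep p.1) idx) idx).getD t
        PySem.Dict.empty).keys.Nodup := by
  induction L generalizing idx with
  | nil => exact hn t
  | cons p ps ih =>
    rw [List.foldl_cons]
    refine ih _ ?_
    intro t'
    -- inner fold over p's tokens preserves per-token nodup keys
    clear ih
    generalize pvNormTokens p.2 = toks
    induction toks generalizing idx with
    | nil => exact hn t'
    | cons tk tks ih2 =>
      rw [List.foldl_cons]
      refine ih2 _ ?_
      intro t''
      unfold pvIndexStep
      by_cases ht : t'' = tk
      · subst ht
        rw [PySem.Dict.getD_insert_self]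
        exact PySem.Dict.nodup_keys_insert _ _ _ (hn t'')
      · rw [PySem.Dict.getD_insert_of_ne _ _ _ ht]
        exact hn t''

-- the built index has unique postings keys
theorem pv_buildIndex_nodup (db : List String) (t : String) :
    (((pvBuildIndex db).getD t PySem.Dict.empty).keys).Nodup := by
  unfold pvBuildIndex
  apply pv_idx_keys_nodup
  intro t'
  simp only [PySem.Dict.getD_empty, PySem.Dict.keys_empty, List.nodup_nil]

-- ---- B-side: the pair-count dictionary ----

-- filtering a nodup list for one of its members gives that singleton
theorem pv_filter_singleton : ∀ (l : List Int) (j : Int), l.Nodup → j ∈ l →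
    l.filter (fun k => decide (k = j)) = [j] := by
  intro l
  induction l with
  | nil => intro j _ hm; simp at hm
  | cons k ks ih =>
    intro j h hm
    rcases List.nodup_cons.mp h with ⟨hk, hks⟩
    by_cases hkj : k = j
    · subst hkj
      have h0 : ks.filter (fun k' => decide (k' = k)) = [] := by
        apply List.filter_eq_nil_iff.mpr
        intro a ha
        simp only [decide_eq_true_eq]
        intro he; exact hk (he ▸ ha)
      simp [h0]
    · have hm' : j ∈ ks := by
        rcases List.mem_cons.mp hm with h' | h'
        · exact absurd h'.symm hkj
        · exact h'
      simp only [List.filter_cons]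
      rw [if_neg (by simp [hkj])]
      exact ih j hks hm'

-- a filtered items sum is a lookup (keys unique)
theorem pv_items_sum (d : PySem.Dict Int Int) (h : d.keys.Nodup) (j : Int) :
    ((d.items.filter (fun q => decide (q.1 = j))).map (·.2)).sum = d.getD j 0 := by
  rw [PySem.Dict.items_eq_map_keys d h 0, List.filter_map]
  have hc : ((fun q : Int × Int => decide (q.1 = j)) ∘ (fun k => (k, d.getD k 0)))
      = fun k => decide (k = j) := by
    funext k; simp
  rw [hc]
  by_cases hm : j ∈ d.keys
  · rw [pv_filter_singleton d.keys j h hm]; simp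
  · have h0 : d.getD j 0 = 0 := by
      apply PySem.Dict.getD_of_not_contains
      rw [← Bool.not_eq_true]
      intro hcc
      exact hm ((PySem.Dict.contains_iff_mem_keys _ _).mp hcc)
    have hfil : d.keys.filter (fun k => decide (k = j)) = [] := by
      apply List.filter_eq_nil_iff.mpr
      intro a ha
      simp only [decide_eq_true_eq]
      intro he; exact hm (he ▸ ha)
    rw [hfil, h0]; simp

-- effect of the postings walk on one pair lookup
theorem pv_pair_items_fold (L : List (Int × Int)) (i : Int)
    (pc : PySem.Dict (Int × Int) Int) (k : Int × Int) :
    ((L.foldl (fun pc q => pc.insert (i, q.1) (pc.getD (i, q.1) 0 + q.2)) pc).getD k 0)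
      = pc.getD k 0
        + (if k.1 = i then ((L.filter (fun q => decide (q.1 = k.2))).map (·.2)).sum else 0) := by
  induction L generalizing pc with
  | nil => simp
  | cons q qs ih =>
    rw [List.foldl_cons, ih, PySem.Dict.getD_insert]
    by_cases h1 : k = (i, q.1)
    · have hk1 : k.1 = i := by rw [h1]
      have hk2 : k.2 = q.1 := by rw [h1]
      rw [if_pos h1]
      simp only [if_pos hk1]
      rw [List.filter_cons, if_pos (by simp [hk2]), List.map_cons, List.sum_cons, ← h1]
      ring
    · by_cases hk1 : k.1 = i
      · have hk2 : ¬ (q.1 = k.2) := fun he => h1 (Prod.ext hk1 he.symm)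
        rw [if_neg h1]
        simp only [if_pos hk1]
        rw [List.filter_cons, if_neg (by simpa using hk2)]
      · rw [if_neg h1]
        simp only [if_neg hk1]

-- effect of processing one tv entry's tokens on one pair lookup
theorem pv_pair_token_fold (toks : List String)
    (idx : PySem.Dict String (PySem.Dict Int Int))
    (hidx : ∀ t, ((idx.getD t PySem.Dict.empty).keys).Nodup)
    (i : Int) (pc : PySem.Dict (Int × Int) Int) (k : Int × Int) :
    ((toks.foldl (pvPairStep idx i) pc).getD k 0)
      = pc.getD k 0
        + (if k.1 = i then
            (((toks.filter pvValid).map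
              (fun t => ((idx.getD t PySem.Dict.empty).getD k.2 0))).sum)
          else 0) := by
  induction toks generalizing pc with
  | nil => simp
  | cons t ts ih =>
    rw [List.foldl_cons, ih]
    have hcond : (decide (t ≠ "") && PySem.Chars.isalpha ((PySem.Str.pyGet? t 0).getD ' ')
        && decide (1 < PySem.Str.len t)) = pvValid t := by
      rcases h : t.toList with _ | ⟨ch, rest⟩
      · have ht : t = "" := String.toList_inj.mp (by simp [h])
        simp [ht, pvValid]
      · have ht : t ≠ "" := by intro he; rw [he] at h; simp at h
        rcases rest with _ | ⟨r, rs⟩ <;>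
          simp [pvValid, h, ht, PySem.Str.len_eq]
    unfold pvPairStep
    rw [hcond]
    by_cases hv : pvValid t
    · rw [if_pos hv, pv_pair_items_fold, List.filter_cons, if_pos hv,
        pv_items_sum _ (hidx t) k.2, List.map_cons, List.sum_cons]
      by_cases hk : k.1 = i
      · simp only [if_pos hk]; ring
      · simp only [if_neg hk]; ring
    · rw [if_neg hv, List.filter_cons, if_neg hv]

-- closed form of a pair-count lookup after Source B's second loop
theorem pv_pair_fold (tv : List String)
    (idx : PySem.Dict String (PySem.Dict Int Int))
    (hidx : ∀ t, ((idx.getD t PySem.Dict.empty).keys).Nodup)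
    (k : Int × Int) :
    (((PySem.List.enumerate tv 0).foldl
        (fun pc p => (pvNormTokens p.2).foldl (pvPairStep idx p.1) pc)
        PySem.Dict.empty).getD k 0)
      = if 0 ≤ k.1 ∧ k.1 < tv.length then
          (((pvNormTokens (tv.getD k.1.toNat "")).filter pvValid).map
            (fun t => ((idx.getD t PySem.Dict.empty).getD k.2 0))).sum
        else 0 := by
  have main : ∀ (L : List (Int × String)) (pc : PySem.Dict (Int × Int) Int),
      ((L.foldl (fun pc p => (pvNormTokens p.2).foldl (pvPairStep idx p.1) pc) pc).getD k 0)
        = pc.getD k 0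
          + ((L.map (fun p => if k.1 = p.1 then
              (((pvNormTokens p.2).filter pvValid).map
                (fun t => ((idx.getD t PySem.Dict.empty).getD k.2 0))).sum else 0)).sum) := by
    intro L
    induction L with
    | nil => intro pc; simp
    | cons p ps ih =>
      intro pc
      rw [List.foldl_cons, ih, pv_pair_token_fold _ _ hidx]
      simp only [List.map_cons, List.sum_cons]
      ring
  rw [main]
  simp only [PySem.Dict.getD_empty, zero_add]
  have hpick := pv_enum_pick tv
    (fun s => (((pvNormTokens s).filter pvValid).map
      (fun t => ((idx.getD t PySem.Dict.empty).getD k.2 0))).sum) k.1 0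
  simp only [zero_add, sub_zero] at hpick
  exact hpick

-- pair-count keys are unique
theorem pv_pair_keys_nodup (tv : List String)
    (idx : PySem.Dict String (PySem.Dict Int Int)) :
    ((PySem.List.enumerate tv 0).foldl
        (fun pc p => (pvNormTokens p.2).foldl (pvPairStep idx p.1) pc)
        PySem.Dict.empty).keys.Nodup := by
  have main : ∀ (L : List (Int × String)) (pc : PySem.Dict (Int × Int) Int),
      pc.keys.Nodup →
      ((L.foldl (fun pc p => (pvNormTokens p.2).foldl (pvPairStep idx p.1) pc) pc)).keys.Nodup := by
    intro L
    induction L with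
    | nil => intro pc h; exact h
    | cons p ps ih =>
      intro pc h
      rw [List.foldl_cons]
      refine ih _ ?_
      generalize pvNormTokens p.2 = toks
      induction toks generalizing pc with
      | nil => exact h
      | cons tk tks ih2 =>
        rw [List.foldl_cons]
        refine ih2 _ ?_
        unfold pvPairStep
        split
        · exact PySem.Dict.nodup_keys_foldl_insert_key _ (fun q : Int × Int => (p.1, q.1)) _ _ h
        · exact h
  exact main _ _ (by simp only [PySem.Dict.keys_empty]; exact List.nodup_nil)

-- pair-count keys lie inside the index rectangle
theorem pv_pair_keys_mem (tv db : List String) (k : Int × Int)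
    (hk : k ∈ ((PySem.List.enumerate tv 0).foldl
        (fun pc p => (pvNormTokens p.2).foldl (pvPairStep (pvBuildIndex db) p.1) pc)
        PySem.Dict.empty).keys) :
    (0 ≤ k.1 ∧ k.1 < tv.length ∧ 0 ≤ k.2 ∧ k.2 < db.length) := by
  have hidxkeys : ∀ t j, j ∈ (((pvBuildIndex db).getD t PySem.Dict.empty).keys) →
      0 ≤ j ∧ j < (db.length : Int) := by
    intro t j hj
    rcases pv_idx_keys _ _ t j hj with h | h
    · simp only [PySem.Dict.getD_empty, PySem.Dict.keys_empty, List.not_mem_nil] at h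
    · rw [PySem.List.map_fst_enumerate, PySem.List.mem_pyRange_one] at h
      omega
  have main : ∀ (L : List (Int × String)) (pc : PySem.Dict (Int × Int) Int),
      k ∈ ((L.foldl (fun pc p => (pvNormTokens p.2).foldl (pvPairStep (pvBuildIndex db) p.1) pc) pc)).keys →
      k ∈ pc.keys ∨ ((k.1 ∈ L.map (·.1)) ∧ 0 ≤ k.2 ∧ k.2 < (db.length : Int)) := by
    intro L
    induction L with
    | nil => intro pc h; exact Or.inl h
    | cons p ps ih =>
      intro pc h
      rw [List.foldl_cons] at h
      rcases ih _ h with h1 | h1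
      · clear h ih
        generalize htoks : pvNormTokens p.2 = toks at h1
        clear htoks
        induction toks generalizing pc with
        | nil => exact Or.inl h1
        | cons tk tks ih2 =>
          rw [List.foldl_cons] at h1
          rcases ih2 _ h1 with h2 | h2
          · unfold pvPairStep at h2
            by_cases hc : (decide (tk ≠ "") && PySem.Chars.isalpha ((PySem.Str.pyGet? tk 0).getD ' ')
                && decide (1 < PySem.Str.len tk)) = true
            · rw [if_pos hc, PySem.Dict.keys_foldl_insert_key] at h2
              rcases (PySem.Set.mem_update _ _ _).mp h2 with h3 | h3
              · exact Or.inl h3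
              · simp only [List.mem_map] at h3
                rcases h3 with ⟨q, hq, hqe⟩
                have hq1 : q.1 ∈ (((pvBuildIndex db).getD tk PySem.Dict.empty).keys) :=
                  PySem.Dict.mem_keys_of_mem_items _ hq
                have hb := hidxkeys tk q.1 hq1
                right
                refine ⟨?_, ?_, ?_⟩
                · rw [List.map_cons]
                  exact List.mem_cons.mpr (Or.inl (by rw [← hqe]))
                · rw [← hqe]; exact hb.1
                · rw [← hqe]; exact hb.2
            · rw [if_neg hc] at h2
              exact Or.inl h2
          · exact Or.inr h2
      · refine Or.inr ⟨?_, h1.2⟩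
        rw [List.map_cons]
        exact List.mem_cons_of_mem _ h1.1
  rcases main _ _ hk with h | h
  · simp only [PySem.Dict.keys_empty, List.not_mem_nil] at h
  · rw [PySem.List.map_fst_enumerate, PySem.List.mem_pyRange_one] at h
    obtain ⟨⟨ha, hb⟩, hc, hd⟩ := h
    exact ⟨ha, by omega, hc, hd⟩

-- a pair-count lookup is the score for in-range keys
theorem pv_pairdict_score (tv db : List String) (k : Int × Int)
    (h1 : 0 ≤ k.1) (h2 : k.1 < (tv.length : Int)) :
    (((PySem.List.enumerate tv 0).foldl
        (fun pc p => (pvNormTokens p.2).foldl (pvPairStep (pvBuildIndex db) p.1) pc)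
        PySem.Dict.empty).getD k 0)
      = if 0 ≤ k.2 ∧ k.2 < (db.length : Int) then
          pvScore (tv.getD k.1.toNat "") (db.getD k.2.toNat "")
        else 0 := by
  rw [pv_pair_fold tv _ (pv_buildIndex_nodup db) k, if_pos ⟨h1, h2⟩]
  by_cases hk2 : 0 ≤ k.2 ∧ k.2 < (db.length : Int)
  · rw [if_pos hk2]
    unfold pvScore
    have hcong : ∀ t ∈ ((pvNormTokens (tv.getD k.1.toNat "")).filter pvValid),
        (((pvBuildIndex db).getD t PySem.Dict.empty).getD k.2 0)
          = ((pvNormTokens (db.getD k.2.toNat "")).count t : Int) := by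
      intro t _
      rw [pv_buildIndex_getD, if_pos hk2]
    rw [List.map_congr_left hcong]
  · rw [if_neg hk2]
    have hz : ∀ t ∈ ((pvNormTokens (tv.getD k.1.toNat "")).filter pvValid),
        (((pvBuildIndex db).getD t PySem.Dict.empty).getD k.2 0) = 0 := by
      intro t _
      rw [pv_buildIndex_getD, if_neg hk2]
    rw [List.map_congr_left hz]
    simp

-- ---- the final count ----

-- a map over range indices is a map over the list
theorem pv_range_map {β : Type} (xs : List String) (g : String → β) :
    (PySem.List.pyRange 0 (xs.length : Int) 1).map (fun i => g (xs.getD i.toNat "")) = xs.map g := by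
  conv_rhs => rw [← PySem.List.map_pyGetD_pyRange_zero' xs ""]
  rw [List.map_map]
  apply List.map_congr_left
  intro i hi
  rw [PySem.List.mem_pyRange_one] at hi
  simp only [Function.comp]
  congr 1
  rw [PySem.List.pyGetD_eq_getElem _ _ hi.1 hi.2, List.getD_eq_getElem _ _ (by omega)]

-- the index map over a range reproduces the list
theorem pv_range_id (xs : List String) :
    (PySem.List.pyRange 0 (xs.length : Int) 1).map (fun i => xs.getD i.toNat "") = xs := by
  have h := pv_range_map xs id
  simpa using h

theorem pv_B_eq (tv db : List String) :
    namelist_compare_fuzzy_alt tv db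
      = (tv.map (fun s => (db.countP (fun d => decide (pvScore s d > 1)) : Int))).sum := by
  unfold namelist_compare_fuzzy_alt
  rw [PySem.List.foldl_ite_add_one, zero_add]
  have hcast : (tv.map (fun s => ((db.countP (fun d => decide (pvScore s d > 1)) : Nat) : Int))).sum
      = ((tv.map (fun s => db.countP (fun d => decide (pvScore s d > 1)))).sum : Int) := by
    rw [Nat.cast_list_sum, List.map_map]; rfl
  rw [hcast]
  congr 1
  set P := (PySem.List.enumerate tv 0).foldl
      (fun pc p => (pvNormTokens p.2).foldl (pvPairStep (pvBuildIndex db) p.1) pc)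
      PySem.Dict.empty with hP
  have hnodup : P.keys.Nodup := pv_pair_keys_nodup tv _
  rw [PySem.Dict.values_eq_map_keys P hnodup 0, List.countP_map]
  set q : Int × Int → Bool := fun k => decide (P.getD k 0 > 1) with hq
  have hkeys : P.keys.countP ((fun v => decide (v > 1)) ∘ (fun k => P.getD k 0))
      = ((PySem.List.pyRange 0 (tv.length : Int) 1) ×ˢ (PySem.List.pyRange 0 (db.length : Int) 1)).countP q := by
    have hqe : ((fun v : Int => decide (v > 1)) ∘ (fun k => P.getD k 0)) = q := rfl
    rw [hqe, List.countP_eq_length_filter, List.countP_eq_length_filter]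
    apply List.Perm.length_eq
    apply (List.perm_ext_iff_of_nodup (List.Nodup.filter q hnodup)
      (List.Nodup.filter q (List.Nodup.product (PySem.List.nodup_pyRange_one 0 (tv.length : Int))
        (PySem.List.nodup_pyRange_one 0 (db.length : Int))))).mpr
    intro k
    rw [List.mem_filter, List.mem_filter, List.mem_product,
      PySem.List.mem_pyRange_one, PySem.List.mem_pyRange_one]
    constructor
    · rintro ⟨hk, hqk⟩
      have hb := pv_pair_keys_mem tv db k hk
      exact ⟨⟨⟨hb.1, hb.2.1⟩, hb.2.2⟩, hqk⟩
    · rintro ⟨⟨⟨ha, hb⟩, hc, hd⟩, hqk⟩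
      refine ⟨?_, hqk⟩
      by_contra hnk
      have hc0 : P.getD k 0 = 0 := by
        apply PySem.Dict.getD_of_not_contains
        rw [← Bool.not_eq_true]
        intro hcc
        exact hnk ((PySem.Dict.contains_iff_mem_keys _ _).mp hcc)
      rw [hq] at hqk
      simp [hc0] at hqk
  rw [hkeys]
  -- countP over the rectangle = sum over rows
  have hrect : ∀ (l1 : List Int),
      (l1 ×ˢ (PySem.List.pyRange 0 (db.length : Int) 1)).countP q
        = (l1.map (fun i => (PySem.List.pyRange 0 (db.length : Int) 1).countP (fun j => q (i, j)))).sum := by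
    intro l1
    induction l1 with
    | nil => rfl
    | cons a l ihl =>
      have hcons : ((a :: l) ×ˢ (PySem.List.pyRange 0 (db.length : Int) 1) : List (Int × Int))
          = (PySem.List.pyRange 0 (db.length : Int) 1).map (Prod.mk a)
              ++ l ×ˢ (PySem.List.pyRange 0 (db.length : Int) 1) := by
        simp [SProd.sprod, List.product]
      rw [hcons, List.countP_append, ihl, List.countP_map, List.map_cons, List.sum_cons]
      have : List.countP (q ∘ Prod.mk a) (PySem.List.pyRange 0 (db.length : Int) 1)
          = List.countP (fun j => q (a, j)) (PySem.List.pyRange 0 (db.length : Int) 1) :=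
        List.countP_congr (fun x _ => by simp [Function.comp])
      rw [this]
  rw [hrect]
  -- each row counts the matching db entries
  have hrow : ∀ i ∈ PySem.List.pyRange 0 (tv.length : Int) 1,
      (PySem.List.pyRange 0 (db.length : Int) 1).countP (fun j => q (i, j))
        = db.countP (fun d => decide (pvScore (tv.getD i.toNat "") d > 1)) := by
    intro i hi
    rw [PySem.List.mem_pyRange_one] at hi
    have hterm : ∀ j ∈ PySem.List.pyRange 0 (db.length : Int) 1,
        q (i, j) = decide (pvScore (tv.getD i.toNat "") (db.getD j.toNat "") > 1) := by
      intro j hj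
      rw [PySem.List.mem_pyRange_one] at hj
      have hs := pv_pairdict_score tv db (i, j) hi.1 hi.2
      rw [← hP] at hs
      simp only [hq]
      rw [hs, if_pos ⟨hj.1, hj.2⟩]
    rw [List.countP_congr (fun j hj => by rw [hterm j hj])]
    conv_rhs => rw [← pv_range_id db]
    rw [List.countP_map]
    exact List.countP_congr (fun x _ => by simp [Function.comp])
  rw [List.map_congr_left (fun i hi => hrow i hi)]
  rw [pv_range_map tv (fun s => db.countP (fun d => decide (pvScore s d > 1)))]

-- ===== VERDICT (by name: the statement is the Claim_ definition above) =====
theorem namelist_compare_fuzzy_spec : Claim_equal_namelist_compare_fuzzy := by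
  intro tv db _
  unfold Spec_namelist_compare_fuzzy
  rw [pv_A_eq, pv_B_eq]
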